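-- pv_equiv track=rewrite | github.com/tamio0800/HappyPie | order_manage/KASH/kashgari_final_with_Alicia.py | get_qnty
-- ===== SOURCE A (Python) =====
-- def get_qnty(y, y_):
--     qnties = []
--     qnty = ''
--     for _y, _y_ in zip(y, y_):
--         if _y_ in ['B-QNT', 'I-QNT']:
--             qnty +=  _y
--         elif _y_ not in ['B-QNT', 'I-QNT'] and qnty != '':
--             qnties.append(qnty)
--             qnty = ''
--     if qnty != '':
--         qnties.append(qnty)
--     return qnties
-- ===== SOURCE B (Python) =====
-- def get_qnty(y, y_):
--     pairs = list(zip(y, y_))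
--     n = len(pairs)
--     qnties = []
--     i = 0
--     while i < n:
--         if pairs[i][1] in ('B-QNT', 'I-QNT'):
--             j = i
--             while j < n and pairs[j][1] in ('B-QNT', 'I-QNT'):
--                 j += 1
--             run = ''.join(tok for tok, _ in pairs[i:j])
--             if run != '':
--                 qnties.append(run)
--             i = j
--         else:
--             i += 1
--     return qnties
-- ===== Notes on version B (the rewrite author's own statement) =====
-- stated objective: alternative
-- what changed: Replaces A's single-pass accumulator/flush state machine with a run-based scan: find each maximal B-QNT/I-QNT block, join its tokens, and keep the join if non-empty.
import Mathlib
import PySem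

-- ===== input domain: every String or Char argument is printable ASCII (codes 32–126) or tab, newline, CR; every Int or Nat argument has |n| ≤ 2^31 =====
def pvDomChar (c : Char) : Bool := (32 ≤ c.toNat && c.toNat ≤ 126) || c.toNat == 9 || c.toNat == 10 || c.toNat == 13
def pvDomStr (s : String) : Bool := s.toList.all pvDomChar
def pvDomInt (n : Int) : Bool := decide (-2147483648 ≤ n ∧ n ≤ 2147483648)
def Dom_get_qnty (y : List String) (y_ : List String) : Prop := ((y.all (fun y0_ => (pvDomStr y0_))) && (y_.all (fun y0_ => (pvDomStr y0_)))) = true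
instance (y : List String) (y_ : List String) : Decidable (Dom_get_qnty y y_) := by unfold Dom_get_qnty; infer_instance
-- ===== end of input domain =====

-- B replaces A's accumulator/flush state machine with a scan over maximal QNT runs
-- (takeWhile/dropWhile, join each run, keep non-empty joins): an alternative decomposition, same cost.


-- `_y_ in ['B-QNT', 'I-QNT']`
def pvIsQ (t : String) : Bool := t == "B-QNT" || t == "I-QNT"

-- ===== PORT A =====
-- loop body of A: state = (qnties, qnty)
def pvStepA (st : List String × String) (p : String × String) : List String × String :=
  if pvIsQ p.2 then (st.1, st.2 ++ p.1)
  else if !pvIsQ p.2 && st.2 != "" then (st.1 ++ [st.2], "")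
  else st

def get_qnty (y : List String) (y_ : List String) : List String :=
  let st := (y.zip y_).foldl pvStepA ([], "")
  if st.2 != "" then st.1 ++ [st.2] else st.1

-- ===== PORT B =====
-- ''.join
def pvJoin : List String → String
  | [] => ""
  | s :: r => s ++ pvJoin r

-- B's outer while-loop: at a QNT position, scan the maximal QNT run (inner while),
-- join its tokens, keep the join if non-empty, continue after the run.
def pvRuns : List (String × String) → List String
  | [] => []
  | (tok, tag) :: rest =>
    if pvIsQ tag then
      let run := pvJoin (tok :: (rest.takeWhile (fun p => pvIsQ p.2)).map Prod.fst)
      let tail := pvRuns (rest.dropWhile (fun p => pvIsQ p.2))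
      if run != "" then run :: tail else tail
    else pvRuns rest
termination_by l => l.length
decreasing_by
· simp only [List.length_cons]
  exact Nat.lt_succ_of_le (List.length_dropWhile_le _ _)
· simp

def get_qnty_alt (y : List String) (y_ : List String) : List String :=
  pvRuns (y.zip y_)

-- ===== PRECONDITION & SPEC =====
def Spec_get_qnty (y : List String) (y_ : List String) (out : List String) : Prop := out = get_qnty_alt y y_
instance (y : List String) (y_ : List String) (out : List String) : Decidable (Spec_get_qnty y y_ out) := by unfold Spec_get_qnty; infer_instance

-- ===== CLAIM (what is proved, stated in full; the proofs are below) =====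
def Claim_equal_get_qnty : Prop := ∀ (y : List String) (y_ : List String), Dom_get_qnty y y_ → Spec_get_qnty y y_ (get_qnty y y_)

-- ===== LEMMAS AND PROOFS =====

-- A's fold, with the final flush, reformulated as structural recursion on the pair list
def pvAux : String → List (String × String) → List String
  | q, [] => if q != "" then [q] else []
  | q, (tok, tag) :: rest =>
    if pvIsQ tag then pvAux (q ++ tok) rest
    else if q != "" then q :: pvAux "" rest
    else pvAux "" rest

theorem pvAux_eq_foldl (l : List (String × String)) :
    ∀ (qs : List String) (q : String),
      (if (l.foldl pvStepA (qs, q)).2 != "" then (l.foldl pvStepA (qs, q)).1 ++ [(l.foldl pvStepA (qs, q)).2]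
       else (l.foldl pvStepA (qs, q)).1) = qs ++ pvAux q l := by
  induction l with
  | nil =>
      intro qs q
      simp only [List.foldl_nil, pvAux]
      split <;> simp
  | cons p rest ih =>
      intro qs q
      obtain ⟨tok, tag⟩ := p
      by_cases hq : pvIsQ tag
      · simp only [List.foldl_cons, pvStepA, hq, if_true, pvAux]
        exact ih qs (q ++ tok)
      · have hq' : pvIsQ tag = false := by simpa using hq
        by_cases hne : q = ""
        · subst hne
          simp only [List.foldl_cons, pvStepA, pvAux, hq']
          simpa using ih qs ""
        · have hb : (q != "") = true := by simpa using hne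
          simp only [List.foldl_cons, pvStepA, pvAux, hq', hb, Bool.false_eq_true, if_false,
            Bool.not_false, Bool.true_and, if_true]
          rw [ih (qs ++ [q]) ""]
          simp

-- run-shaped unfolding of pvRuns, valid for every list
theorem pvRuns_run_shape (l : List (String × String)) :
    pvRuns l =
      (if pvJoin ((l.takeWhile (fun p => pvIsQ p.2)).map Prod.fst) != "" then
        pvJoin ((l.takeWhile (fun p => pvIsQ p.2)).map Prod.fst) ::
          pvRuns (l.dropWhile (fun p => pvIsQ p.2))
       else pvRuns (l.dropWhile (fun p => pvIsQ p.2))) := by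
  cases l with
  | nil => simp [pvRuns, pvJoin]
  | cons p rest =>
      obtain ⟨tok, tag⟩ := p
      by_cases hq : pvIsQ tag
      · rw [pvRuns]
        simp [hq]
      · have hq' : pvIsQ tag = false := by simpa using hq
        simp [hq', pvJoin]

theorem pvAux_eq_runs (l : List (String × String)) :
    ∀ q : String,
      pvAux q l =
        (if (q ++ pvJoin ((l.takeWhile (fun p => pvIsQ p.2)).map Prod.fst)) != "" then
          (q ++ pvJoin ((l.takeWhile (fun p => pvIsQ p.2)).map Prod.fst)) ::
            pvRuns (l.dropWhile (fun p => pvIsQ p.2))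
         else pvRuns (l.dropWhile (fun p => pvIsQ p.2))) := by
  induction l with
  | nil =>
      intro q
      simp [pvAux, pvRuns, pvJoin, String.append_empty]
  | cons p rest ih =>
      intro q
      obtain ⟨tok, tag⟩ := p
      by_cases hq : pvIsQ tag
      · simp only [pvAux, hq, if_true, List.takeWhile_cons, List.dropWhile_cons,
          List.map_cons, pvJoin]
        rw [ih (q ++ tok)]
        simp [String.append_assoc]
      · have hq' : pvIsQ tag = false := by simpa using hq
        have hrest : pvAux "" rest = pvRuns rest := by
          rw [ih "", String.empty_append, ← pvRuns_run_shape]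
        have hR : pvRuns ((tok, tag) :: rest) = pvRuns rest := by
          rw [pvRuns]; simp [hq']
        simp only [pvAux, hq', List.takeWhile_cons, List.dropWhile_cons, Bool.false_eq_true,
          if_false, List.map_nil]
        rw [hR, hrest]
        by_cases hne : q = ""
        · subst hne; simp [pvJoin]
        · have hb : (q != "") = true := by simpa using hne
          simp [pvJoin, hb, String.append_empty]

-- ===== VERDICT (by name: the statement is the Claim_ definition above) =====
theorem get_qnty_spec : Claim_equal_get_qnty := by
  intro y y_ _
  unfold Spec_get_qnty get_qnty get_qnty_alt
  have h := pvAux_eq_foldl (y.zip y_) [] ""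
  simp only [List.nil_append] at h
  rw [h, pvAux_eq_runs, String.empty_append, ← pvRuns_run_shape]
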